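-- pv_equiv track=rewrite | github.com/elidupree/eliduprees-website-source | blog.py | make_page_list
-- ===== SOURCE A (Python) =====
-- page_length = 10
--
-- latest_page_max_posts = page_length + 5
--
-- def make_page_list (posts):
--   if len(posts) == 0:
--     return []
--   result = []
--   strong_count = 0
--   for post in posts:
--     if "ignore_for_page_numbering" not in post:
--       strong_count = strong_count + 1
--   fixed_pages = max (0, (strong_count - latest_page_max_posts + page_length - 1)//page_length)
--   index = 0;
--   for page_number in range (0, fixed_pages):
--     page = []
--     page_strong_count = 0
--     while True:
--       post = posts [index]
--       if "deleted" not in post: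
--         page.append (post)
--       # Note: deleted posts DO count in the page numbering so that the pages don't lose their place when I delete old posts
--       if "ignore_for_page_numbering" not in post:
--         page_strong_count = page_strong_count + 1
--       index = index + 1
--       if page_strong_count == page_length:
--         break
--     result.append(page)
--   result.append ([posts [i] for i in range (index, len(posts))])
--   return result
-- ===== SOURCE B (Python) =====
-- page_length = 10
--
-- latest_page_max_posts = page_length + 5
--
-- def make_page_list(posts):
--   # Single linear pass: each post's page index is (strong posts seen so far) // page_length.
--   if len(posts) == 0:
--     return []
--   strong_count = sum(1 for post in posts if "ignore_for_page_numbering" not in post)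
--   fixed_pages = max(0, (strong_count - latest_page_max_posts + page_length - 1)//page_length)
--   pages = [[] for _ in range(fixed_pages)]
--   final = []
--   s = 0
--   for post in posts:
--     page = s // page_length
--     if "ignore_for_page_numbering" not in post:
--       s += 1
--     if page < fixed_pages:
--       if "deleted" not in post:
--         pages[page].append(post)
--     else:
--       final.append(post)
--   pages.append(final)
--   return pages
-- ===== Notes on version B (the rewrite author's own statement) =====
-- stated objective: simpler
-- what changed: Replaces A's nested page loop with an inner while that re-scans posts by index with a single linear pass that sends each post to page (strong posts seen so far) // page_length, preallocating the fixed pages.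
import Mathlib
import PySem

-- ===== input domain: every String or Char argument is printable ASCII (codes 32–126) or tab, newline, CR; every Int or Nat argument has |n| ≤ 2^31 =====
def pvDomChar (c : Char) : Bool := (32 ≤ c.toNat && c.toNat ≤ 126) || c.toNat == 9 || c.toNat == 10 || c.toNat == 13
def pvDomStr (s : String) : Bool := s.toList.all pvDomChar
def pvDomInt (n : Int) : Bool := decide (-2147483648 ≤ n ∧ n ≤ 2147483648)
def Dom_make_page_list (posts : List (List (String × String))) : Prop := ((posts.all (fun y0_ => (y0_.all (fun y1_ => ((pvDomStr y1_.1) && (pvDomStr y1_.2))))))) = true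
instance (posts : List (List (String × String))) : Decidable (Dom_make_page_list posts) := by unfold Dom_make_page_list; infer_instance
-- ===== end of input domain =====

-- B replaces A's nested page/while loops by one linear pass that sends each post to page
-- (strong posts seen so far) // page_length; objective: simpler (no measured speed claim).

abbrev PvPost := List (String × String)

-- "k" in post  (post is a Python dict ported as an association list)
def pvHasKey (post : PvPost) (k : String) : Bool := post.any (fun kv => kv.1 == k)

def pv_page_length : Nat := 10
def pv_latest_page_max_posts : Nat := pv_page_length + 5

-- ===== PORT A =====
-- A's inner `while True` loop, walking the remaining suffix of posts instead of an index
-- (the index is always in range in Python, so the suffix view is exact; the [] case is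
-- where Python's posts[index] would raise IndexError — unreachable).
def pvWhileA (rest : List PvPost) (page : List PvPost) (psc : Nat) :
    List PvPost × List PvPost :=
  match rest with
  | [] => (page, [])
  | post :: rest' =>
    let page' := if !pvHasKey post "deleted" then page ++ [post] else page
    let psc' := if !pvHasKey post "ignore_for_page_numbering" then psc + 1 else psc
    if psc' = pv_page_length then (page', rest') else pvWhileA rest' page' psc'

-- A's `for page_number in range(0, fixed_pages)` loop
def pvPagesA (rest : List PvPost) (n : Nat) (result : List (List PvPost)) :
    List (List PvPost) × List PvPost :=
  match n with
  | 0 => (result, rest)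
  | n + 1 =>
    let pr := pvWhileA rest [] 0
    pvPagesA pr.2 n (result ++ [pr.1])

def make_page_list (posts : List (List (String × String))) : List (List (List (String × String))) :=
  if posts.length = 0 then []
  else
    let strong_count : Nat :=
      posts.foldl (fun sc post => if !pvHasKey post "ignore_for_page_numbering" then sc + 1 else sc) 0
    let fixed_pages : Int :=
      max 0 (PySem.Int.floordiv ((strong_count : Int) - (pv_latest_page_max_posts : Int) + (pv_page_length : Int) - 1) (pv_page_length : Int))
    let pr := pvPagesA posts fixed_pages.toNat []
    -- final page: [posts[i] for i in range(index, len(posts))] = the remaining suffix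
    pr.1 ++ [pr.2]

-- ===== PORT B =====
-- one step of Source B's single `for post in posts` loop; state = (pages, final, s)
def pvStepB (f : Nat) (acc : List (List PvPost) × List PvPost × Nat) (post : PvPost) :
    List (List PvPost) × List PvPost × Nat :=
  let pages := acc.1
  let final := acc.2.1
  let s := acc.2.2
  let page := s / pv_page_length
  let s' := if !pvHasKey post "ignore_for_page_numbering" then s + 1 else s
  if page < f then
    (if !pvHasKey post "deleted" then pages.set page (pages.getD page [] ++ [post]) else pages,
     final, s')
  else
    (pages, final ++ [post], s')

def make_page_list_alt (posts : List (List (String × String))) : List (List (List (String × String))) :=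
  if posts.length = 0 then []
  else
    let strong_count : Nat :=
      (posts.filter (fun post => !pvHasKey post "ignore_for_page_numbering")).length
    let fixed_pages : Nat :=
      (max 0 (PySem.Int.floordiv ((strong_count : Int) - (pv_latest_page_max_posts : Int) + (pv_page_length : Int) - 1) (pv_page_length : Int))).toNat
    let acc := posts.foldl (pvStepB fixed_pages) (List.replicate fixed_pages [], [], 0)
    acc.1 ++ [acc.2.1]

-- ===== PRECONDITION & SPEC =====
def Spec_make_page_list (posts : List (List (String × String))) (out : List (List (List (String × String)))) : Prop := out = make_page_list_alt posts
instance (posts : List (List (String × String))) (out : List (List (List (String × String)))) : Decidable (Spec_make_page_list posts out) := by unfold Spec_make_page_list; infer_instance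

-- ===== CLAIM (what is proved, stated in full; the proofs are below) =====
def Claim_equal_make_page_list : Prop := ∀ (posts : List (List (String × String))), Dom_make_page_list posts → Spec_make_page_list posts (make_page_list posts)

-- ===== LEMMAS AND PROOFS =====

-- number of "strong" posts (those counted for page numbering)
def pvCS (l : List PvPost) : Nat := l.countP (fun post => !pvHasKey post "ignore_for_page_numbering")

theorem pvCS_cons (p : PvPost) (l : List PvPost) :
    pvCS (p :: l) = (if pvHasKey p "ignore_for_page_numbering" then 0 else 1) + pvCS l := by
  cases h : pvHasKey p "ignore_for_page_numbering" <;>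
    simp [pvCS, h, Nat.add_comm]

theorem pv_sc_foldl (l : List PvPost) (a : Nat) :
    l.foldl (fun sc post => if !pvHasKey post "ignore_for_page_numbering" then sc + 1 else sc) a
      = a + pvCS l := by
  induction l generalizing a with
  | nil => simp [pvCS]
  | cons p t ih =>
    rw [List.foldl_cons, ih, pvCS_cons]
    cases h : pvHasKey p "ignore_for_page_numbering" <;> simp <;> omega

-- tail phase: once s ≥ 10·f every post goes to the final page
theorem pvTail (f : Nat) (rest : List PvPost) (pages : List (List PvPost))
    (final : List PvPost) (s : Nat) (hs : 10 * f ≤ s) :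
    rest.foldl (pvStepB f) (pages, final, s) = (pages, final ++ rest, s + pvCS rest) := by
  induction rest generalizing final s with
  | nil => simp [pvCS]
  | cons post rest' ih =>
    have hnd : ¬ (s / pv_page_length < f) := by
      simp only [pv_page_length]; omega
    rw [List.foldl_cons]
    show rest'.foldl (pvStepB f) (pvStepB f (pages, final, s) post) = _
    cases h : pvHasKey post "ignore_for_page_numbering" <;>
      simp only [pvStepB, hnd, if_false, h, Bool.not_true, Bool.not_false] <;>
      simp <;>
      rw [ih _ _ (by omega)] <;>
      simp [pvCS_cons, h] <;>
      omega

-- page phase: A's inner while loop matches B's pass while inside page k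
theorem pvCS_cons_strong (p : PvPost) (l : List PvPost)
    (h : pvHasKey p "ignore_for_page_numbering" = false) : pvCS (p :: l) = 1 + pvCS l := by
  rw [pvCS_cons, h]; simp

theorem pvCS_cons_weak (p : PvPost) (l : List PvPost)
    (h : pvHasKey p "ignore_for_page_numbering" = true) : pvCS (p :: l) = pvCS l := by
  rw [pvCS_cons, h]; simp

theorem pvWhileStep (f : Nat) (rest : List PvPost) (psc : Nat) (pg : List PvPost)
    (pages : List (List PvPost)) (final : List PvPost) (k : Nat)
    (hpsc : psc < 10) (hcs : 10 - psc ≤ pvCS rest) (hk : k < f)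
    (hlen : pages.length = f) (hget : pages[k]?.getD [] = pg) :
    rest.foldl (pvStepB f) (pages, final, 10 * k + psc)
      = (pvWhileA rest pg psc).2.foldl (pvStepB f)
          (pages.set k (pvWhileA rest pg psc).1, final, 10 * (k + 1))
    ∧ pvCS (pvWhileA rest pg psc).2 + (10 - psc) = pvCS rest := by
  induction rest generalizing psc pg pages with
  | nil => exfalso; simp [pvCS] at hcs; omega
  | cons post rest' ih =>
    have hkk : k < pages.length := by omega
    have hdiv : (10 * k + psc) / pv_page_length = k := by
      simp only [pv_page_length]; omega
    have hgetD : pages.getD k [] = pg := by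
      rw [List.getD_eq_getElem?_getD]; exact hget
    have hself : pages.set k pg = pages := by
      rw [← hget, List.getElem?_eq_getElem hkk]
      exact List.set_getElem_self hkk
    rw [List.foldl_cons, pvWhileA]
    show rest'.foldl (pvStepB f) (pvStepB f (pages, final, 10 * k + psc) post) = _ ∧ _
    cases hdel : pvHasKey post "deleted" <;>
      cases hstrb : pvHasKey post "ignore_for_page_numbering" <;>
        simp only [pvStepB, hdiv, hk, if_true, hdel, hstrb, hgetD,
          Bool.not_true, Bool.not_false] <;>
        (try simp only [Bool.false_eq_true, ite_false])
    · -- not deleted, strong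
      by_cases hb : psc + 1 = pv_page_length
      · -- the 10th strong post: the page closes here
        simp only [pv_page_length] at hb
        have hp9 : psc = 9 := by omega
        subst hp9
        simp only [pv_page_length, reduceIte]
        refine ⟨?_, by rw [pvCS_cons_strong post rest' hstrb]; omega⟩
        have h10 : 10 * k + 9 + 1 = 10 * (k + 1) := by omega
        rw [h10]
      · rw [if_neg hb]
        have hb' : psc + 1 < 10 := by
          simp only [pv_page_length] at hb; omega
        have hcs2 : 10 - (psc + 1) ≤ pvCS rest' := by
          rw [pvCS_cons_strong post rest' hstrb] at hcs; omega
        have hget2 : (pages.set k (pg ++ [post]))[k]?.getD [] = pg ++ [post] := by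
          rw [List.getElem?_set_self hkk]; rfl
        have hmain := ih (psc + 1) (pg ++ [post]) (pages.set k (pg ++ [post]))
          hb' hcs2 (by simp [hlen]) hget2
        rw [List.set_set] at hmain
        refine ⟨hmain.1, ?_⟩
        have := hmain.2
        rw [pvCS_cons_strong post rest' hstrb]
        omega
    · -- not deleted, not strong: no break possible (psc < 10)
      have hb : ¬ (psc = pv_page_length) := by
        simp only [pv_page_length]; omega
      rw [if_neg hb]
      have hcs2 : 10 - psc ≤ pvCS rest' := by
        rw [pvCS_cons_weak post rest' hstrb] at hcs; omega
      have hget2 : (pages.set k (pg ++ [post]))[k]?.getD [] = pg ++ [post] := by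
        rw [List.getElem?_set_self hkk]; rfl
      have hmain := ih psc (pg ++ [post]) (pages.set k (pg ++ [post]))
        hpsc hcs2 (by simp [hlen]) hget2
      rw [List.set_set] at hmain
      refine ⟨hmain.1, ?_⟩
      have := hmain.2
      rw [pvCS_cons_weak post rest' hstrb]
      omega
    · -- deleted, strong
      by_cases hb : psc + 1 = pv_page_length
      · simp only [pv_page_length] at hb
        have hp9 : psc = 9 := by omega
        subst hp9
        simp only [pv_page_length, reduceIte]
        refine ⟨?_, by rw [pvCS_cons_strong post rest' hstrb]; omega⟩
        have h10 : 10 * k + 9 + 1 = 10 * (k + 1) := by omega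
        rw [hself, h10]
      · rw [if_neg hb]
        have hb' : psc + 1 < 10 := by
          simp only [pv_page_length] at hb; omega
        have hcs2 : 10 - (psc + 1) ≤ pvCS rest' := by
          rw [pvCS_cons_strong post rest' hstrb] at hcs; omega
        have hmain := ih (psc + 1) pg pages hb' hcs2 hlen hget
        refine ⟨hmain.1, ?_⟩
        have := hmain.2
        rw [pvCS_cons_strong post rest' hstrb]
        omega
    · -- deleted, not strong
      have hb : ¬ (psc = pv_page_length) := by
        simp only [pv_page_length]; omega
      rw [if_neg hb]
      have hcs2 : 10 - psc ≤ pvCS rest' := by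
        rw [pvCS_cons_weak post rest' hstrb] at hcs; omega
      have hmain := ih psc pg pages hpsc hcs2 hlen hget
      refine ⟨hmain.1, ?_⟩
      have := hmain.2
      rw [pvCS_cons_weak post rest' hstrb]
      omega

-- outer phase: B's fold over the whole list reproduces A's page loop plus the final page
theorem pvOuter (f : Nat) (n : Nat) (rest : List PvPost) (done : List (List PvPost))
    (final : List PvPost) (hf : done.length + n = f) (hcs : 10 * n ≤ pvCS rest) :
    rest.foldl (pvStepB f) (done ++ List.replicate n [], final, 10 * done.length)
      = ((pvPagesA rest n done).1, final ++ (pvPagesA rest n done).2,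
         10 * f + pvCS (pvPagesA rest n done).2) := by
  induction n generalizing rest done final with
  | zero =>
    rw [pvPagesA]
    simp only [List.replicate_zero, List.append_nil]
    rw [pvTail f rest done final _ (by omega)]
    have : done.length = f := by omega
    rw [this]
  | succ n ih =>
    rw [pvPagesA]
    have hk : done.length < f := by omega
    have hget : (done ++ List.replicate (n + 1) ([] : List PvPost))[done.length]?.getD [] = [] := by
      rw [List.getElem?_append_right (le_refl done.length)]
      simp [List.replicate_succ]
    have hw := pvWhileStep f rest 0 [] (done ++ List.replicate (n + 1) []) final done.length
      (by omega) (by omega) hk (by simp; omega) hget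
    simp only [Nat.add_zero] at hw
    rw [hw.1]
    have hset : (done ++ List.replicate (n + 1) ([] : List PvPost)).set done.length (pvWhileA rest [] 0).1
        = (done ++ [(pvWhileA rest [] 0).1]) ++ List.replicate n [] := by
      rw [List.replicate_succ, List.set_append_right _ _ (le_refl done.length)]
      simp
    rw [hset]
    have hcs2 : 10 * n ≤ pvCS (pvWhileA rest [] 0).2 := by
      have := hw.2; omega
    have := ih (pvWhileA rest [] 0).2 (done ++ [(pvWhileA rest [] 0).1]) final
      (by simp; omega) hcs2
    simp only [List.length_append, List.length_singleton] at this
    have h10 : 10 * (done.length + 1) = 10 * done.length + 10 := by omega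
    rw [h10] at this
    have h10' : 10 * (done.length + 1) = 10 * done.length + 10 := by omega
    rw [h10'] at hw ⊢
    exact this

theorem pv_main (posts : List (List (String × String))) :
    make_page_list posts = make_page_list_alt posts := by
  rw [make_page_list, make_page_list_alt]
  by_cases hnil : posts.length = 0
  · simp [hnil]
  · simp only [hnil, if_false]
    rw [pv_sc_foldl, ← List.countP_eq_length_filter]
    have hsc : (0 : Nat) + pvCS posts = posts.countP (fun post => !pvHasKey post "ignore_for_page_numbering") := by
      simp [pvCS]
    rw [hsc]
    set sc := posts.countP (fun post => !pvHasKey post "ignore_for_page_numbering") with hscdef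
    set fI : Int := max 0 (PySem.Int.floordiv ((sc : Int) - (pv_latest_page_max_posts : Int) + (pv_page_length : Int) - 1) (pv_page_length : Int)) with hfI
    have hfd : PySem.Int.floordiv ((sc : Int) - (pv_latest_page_max_posts : Int) + (pv_page_length : Int) - 1) (pv_page_length : Int)
        = ((sc : Int) - 6) / 10 := by
      rw [PySem.Int.floordiv_eq_ediv_of_pos (by simp [pv_page_length] : (0:Int) < (pv_page_length : Int))]
      simp only [pv_page_length, pv_latest_page_max_posts]
      omega
    have hcount : pvCS posts = sc := rfl
    have hbound : 10 * fI.toNat ≤ pvCS posts := by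
      rw [hcount, hfI, hfd]
      omega
    have := pvOuter fI.toNat fI.toNat posts [] [] (by simp) hbound
    simp only [List.length_nil, Nat.mul_zero, List.nil_append] at this
    rw [this]

-- ===== VERDICT (by name: the statement is the Claim_ definition above) =====
theorem make_page_list_spec : Claim_equal_make_page_list := by
  intro posts _
  unfold Spec_make_page_list
  exact pv_main posts
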